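-- pv_equiv track=rewrite | github.com/kevinsu/aoc | day13/part2/main.py | get_sums
-- ===== SOURCE A (Python) =====
-- def get_sums(pattern):
--   rows = [0]*len(pattern)
--   columns = [0]*len(pattern[0])
--   for i, row in enumerate(pattern):
--     for j, column in enumerate(row):
--       if column == '#':
--         rows[i] += 2**(j)
--         columns[j] += 2**(i)
--   return rows, columns
-- ===== SOURCE B (Python) =====
-- def get_sums(pattern):
--   rows = [sum(2**j for j, c in enumerate(r) if c == '#') for r in pattern]
--   columns = [sum(2**i for i, r in enumerate(pattern) if j < len(r) and r[j] == '#')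
--              for j in range(len(pattern[0]))]
--   return rows, columns
-- ===== Notes on version B (the rewrite author's own statement) =====
-- stated objective: simpler
-- what changed: A fills two mutable lists inside one interleaved nested loop; B computes the two results in two independent passes: row masks by a per-row comprehension and column masks by a per-column scan over the rows.
import Mathlib
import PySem

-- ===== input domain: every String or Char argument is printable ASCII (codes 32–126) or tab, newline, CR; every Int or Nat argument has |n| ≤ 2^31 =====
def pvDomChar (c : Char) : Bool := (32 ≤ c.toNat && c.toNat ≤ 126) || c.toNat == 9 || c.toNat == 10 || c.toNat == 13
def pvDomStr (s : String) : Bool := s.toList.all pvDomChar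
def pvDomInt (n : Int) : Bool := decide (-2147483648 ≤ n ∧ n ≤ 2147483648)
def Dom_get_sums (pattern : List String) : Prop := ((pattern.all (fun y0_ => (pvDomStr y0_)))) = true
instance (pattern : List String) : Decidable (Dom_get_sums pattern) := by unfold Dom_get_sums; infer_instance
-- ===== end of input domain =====

-- B recomputes the same sums as two independent passes (row masks by comprehension,
-- column masks by per-column scan) instead of A's single nested loop mutating two lists.

-- ===== PORT A =====
-- rows[i] += v  /  columns[j] += v  (a no-op where Python would raise IndexError; Pre_ excludes those inputs)
def bump (xs : List Int) (i : Nat) (v : Int) : List Int := xs.set i (xs.getD i 0 + v)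

def get_sums (pattern : List String) : List Int × List Int :=
  let rows0 : List Int := List.replicate pattern.length 0
  let cols0 : List Int := List.replicate (pattern.headD "").toList.length 0
  pattern.zipIdx.foldl
    (fun st p =>
      p.1.toList.zipIdx.foldl
        (fun st2 q =>
          if q.1 = '#' then
            (bump st2.1 p.2 ((2:Int) ^ q.2), bump st2.2 q.2 ((2:Int) ^ p.2))
          else st2)
        st)
    (rows0, cols0)

-- ===== PORT B =====
def rowMask (chars : List Char) : Int :=
  chars.zipIdx.foldl (fun acc q => if q.1 = '#' then acc + (2:Int) ^ q.2 else acc) 0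

def colMask (pattern : List String) (j : Nat) : Int :=
  pattern.zipIdx.foldl
    (fun acc p => if j < p.1.toList.length ∧ p.1.toList.getD j ' ' = '#' then acc + (2:Int) ^ p.2 else acc) 0

def get_sums_alt (pattern : List String) : List Int × List Int :=
  (pattern.map (fun r => rowMask r.toList),
   (List.range (pattern.headD "").toList.length).map (colMask pattern))

-- ===== PRECONDITION & SPEC =====
-- Pre_ excludes exactly the inputs on which Python A raises IndexError: the empty
-- pattern, and patterns where some row has '#' at a column index ≥ len(pattern[0]).
def Pre_get_sums (pattern : List String) : Prop :=
  pattern ≠ [] ∧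
  ∀ r ∈ pattern, ∀ j < r.toList.length,
    r.toList.getD j ' ' = '#' → j < (pattern.headD "").toList.length

instance (pattern : List String) : Decidable (Pre_get_sums pattern) := by
  unfold Pre_get_sums; infer_instance

def pvWitness_get_sums : List String := ["#.", ".#"]

def Spec_get_sums (pattern : List String) (out : List Int × List Int) : Prop := out = get_sums_alt pattern
instance (pattern : List String) (out : List Int × List Int) : Decidable (Spec_get_sums pattern out) := by unfold Spec_get_sums; infer_instance

-- ===== CLAIM (what is proved, stated in full; the proofs are below) =====
def Claim_equal_get_sums : Prop := ∀ (pattern : List String), Dom_get_sums pattern → Pre_get_sums pattern → Spec_get_sums pattern (get_sums pattern)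

-- ===== LEMMAS AND PROOFS =====


theorem getD_set' (xs : List Int) (i m : Nat) (v : Int) :
    (xs.set i v).getD m 0 = if m = i ∧ i < xs.length then v else xs.getD m 0 := by
  simp [List.getD_eq_getElem?_getD, List.getElem?_set]
  split_ifs with h1 h2 h3 <;> simp_all

theorem getD_bump (xs : List Int) (i m : Nat) (v : Int) :
    (bump xs i v).getD m 0 = xs.getD m 0 + (if m = i ∧ i < xs.length then v else 0) := by
  rw [bump, getD_set']
  split_ifs with h
  · rcases h with ⟨rfl, _⟩; ring
  · ring

theorem length_bump (xs : List Int) (i : Nat) (v : Int) : (bump xs i v).length = xs.length := by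
  simp [bump]

theorem bump_zero (xs : List Int) (i : Nat) : bump xs i 0 = xs := by
  induction xs generalizing i with
  | nil => rfl
  | cons x xs ih =>
    cases i with
    | zero => simp [bump]
    | succ n => simpa [bump, List.getD_cons_succ] using ih n

theorem bump_bump (xs : List Int) (i : Nat) (a b : Int) :
    bump (bump xs i a) i b = bump xs i (a + b) := by
  by_cases h : i < xs.length
  · unfold bump
    rw [List.set_set, getD_set', if_pos ⟨rfl, h⟩]
    ring_nf
  · unfold bump
    have h1 : ∀ v : Int, xs.set i v = xs := fun v => List.set_eq_of_length_le (by omega)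
    simp only [h1]

def stepRow (i : Nat) (rs : List Int) (q : Char × Nat) : List Int :=
  if q.1 = '#' then bump rs i ((2:Int) ^ q.2) else rs

def stepCol (i : Nat) (cs : List Int) (q : Char × Nat) : List Int :=
  if q.1 = '#' then bump cs q.2 ((2:Int) ^ i) else cs

theorem mask_fold_init (l : List (Char × Nat)) (a : Int) :
    l.foldl (fun acc q => if q.1 = '#' then acc + (2:Int) ^ q.2 else acc) a
      = a + l.foldl (fun acc q => if q.1 = '#' then acc + (2:Int) ^ q.2 else acc) 0 := by
  induction l generalizing a with
  | nil => simp
  | cons x xs ih =>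
    simp only [List.foldl_cons]
    rw [ih (if x.1 = '#' then a + 2 ^ x.2 else a), ih (if x.1 = '#' then 0 + 2 ^ x.2 else 0)]
    split_ifs <;> ring

theorem inner_rows (i : Nat) :
    ∀ (chars : List Char) (s : Nat) (rs : List Int),
      (chars.zipIdx s).foldl (stepRow i) rs
        = bump rs i ((chars.zipIdx s).foldl (fun acc q => if q.1 = '#' then acc + (2:Int) ^ q.2 else acc) 0) := by
  intro chars
  induction chars with
  | nil => intro s rs; simp [List.zipIdx, bump_zero]
  | cons c rest ih =>
    intro s rs
    rw [List.zipIdx_cons, List.foldl_cons, List.foldl_cons, ih]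
    rw [mask_fold_init (rest.zipIdx (s+1)) (if (c,s).1 = '#' then 0 + (2:Int)^(c,s).2 else 0)]
    unfold stepRow
    simp only
    split_ifs with hc
    · rw [bump_bump]; congr 1; ring
    · congr 1; ring


theorem rowsA_getD (m : Nat) :
    ∀ (pattern : List String) (s : Nat) (rs : List Int),
      ((pattern.zipIdx s).foldl (fun rs p => (p.1.toList.zipIdx).foldl (stepRow p.2) rs) rs).getD m 0
        = rs.getD m 0 +
          (if s ≤ m ∧ m - s < pattern.length ∧ m < rs.length
           then rowMask ((pattern.getD (m - s) "").toList) else 0) := by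
  intro pattern
  induction pattern with
  | nil =>
    intro s rs
    have : ¬ (s ≤ m ∧ m - s < ([] : List String).length ∧ m < rs.length) := by
      simp
    rw [if_neg this]; simp [List.zipIdx]
  | cons r rest ih =>
    intro s rs
    rw [List.zipIdx_cons, List.foldl_cons, ih]
    rw [inner_rows]
    rw [length_bump, getD_bump]
    simp only [List.length_cons]
    by_cases h1 : m = s
    · subst h1
      by_cases h2 : m < rs.length
      · have c1 : ¬ (m + 1 ≤ m ∧ m - (m+1) < rest.length ∧ m < rs.length) := by omega
        have c2 : (m = m ∧ m < rs.length) := ⟨rfl, h2⟩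
        rw [if_neg c1, if_pos c2, if_pos (show m ≤ m ∧ m - m < rest.length + 1 ∧ m < rs.length by omega)]
        simp [rowMask]
      · have c1 : ¬ (m + 1 ≤ m ∧ m - (m+1) < rest.length ∧ m < rs.length) := by omega
        rw [if_neg c1, if_neg (by omega : ¬ (m = m ∧ m < rs.length)),
            if_neg (by omega : ¬ (m ≤ m ∧ m - m < rest.length + 1 ∧ m < rs.length))]
        ring
    · rw [if_neg (by omega : ¬ (m = s ∧ s < rs.length))]
      by_cases h2 : s + 1 ≤ m ∧ m - (s+1) < rest.length ∧ m < rs.length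
      · rw [if_pos h2, if_pos (by omega : s ≤ m ∧ m - s < rest.length + 1 ∧ m < rs.length)]
        have hms : m - s = (m - (s+1)) + 1 := by omega
        rw [hms, List.getD_cons_succ]
        ring
      · rw [if_neg h2, if_neg (by omega : ¬ (s ≤ m ∧ m - s < rest.length + 1 ∧ m < rs.length))]
        ring

theorem length_rowsFold :
    ∀ (pattern : List String) (s : Nat) (rs : List Int),
      ((pattern.zipIdx s).foldl (fun rs p => (p.1.toList.zipIdx).foldl (stepRow p.2) rs) rs).length
        = rs.length := by
  intro pattern
  induction pattern with
  | nil => intro s rs; simp [List.zipIdx]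
  | cons r rest ih =>
    intro s rs
    rw [List.zipIdx_cons, List.foldl_cons, ih, inner_rows, length_bump]

theorem length_stepCol_fold (i : Nat) :
    ∀ (l : List (Char × Nat)) (cs : List Int),
      (l.foldl (stepCol i) cs).length = cs.length := by
  intro l
  induction l with
  | nil => intro cs; rfl
  | cons q rest ih =>
    intro cs
    rw [List.foldl_cons, ih]
    unfold stepCol
    split_ifs <;> simp [length_bump]

theorem inner_cols_getD (i m : Nat) :
    ∀ (chars : List Char) (s : Nat) (cs : List Int),
      ((chars.zipIdx s).foldl (stepCol i) cs).getD m 0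
        = cs.getD m 0 +
          (if s ≤ m ∧ m - s < chars.length ∧ chars.getD (m - s) ' ' = '#' ∧ m < cs.length
           then (2:Int) ^ i else 0) := by
  intro chars
  induction chars with
  | nil =>
    intro s cs
    rw [if_neg (by simp)]
    simp [List.zipIdx]
  | cons c rest ih =>
    intro s cs
    rw [List.zipIdx_cons, List.foldl_cons, ih]
    simp only [List.length_cons]
    have hlen : (stepCol i cs (c, s)).length = cs.length := by
      unfold stepCol; split_ifs <;> simp [length_bump]
    have hget : (stepCol i cs (c, s)).getD m 0
        = cs.getD m 0 + (if c = '#' ∧ m = s ∧ s < cs.length then (2:Int) ^ i else 0) := by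
      unfold stepCol
      simp only
      by_cases hc : c = '#'
      · rw [if_pos hc, getD_bump]
        by_cases h : m = s ∧ s < cs.length
        · rw [if_pos h, if_pos ⟨hc, h⟩]
        · rw [if_neg h, if_neg (by tauto)]
      · rw [if_neg hc, if_neg (by tauto)]
        ring
    rw [hlen, hget]
    by_cases h1 : m = s
    · subst h1
      rw [if_neg (by omega : ¬ (m + 1 ≤ m ∧ m - (m+1) < rest.length ∧ rest.getD (m - (m+1)) ' ' = '#' ∧ m < cs.length))]
      simp only [Nat.sub_self, List.getD_cons_zero]
      by_cases h2 : c = '#' ∧ m < cs.length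
      · rw [if_pos (show c = '#' ∧ True ∧ m < cs.length by tauto),
            if_pos (show m ≤ m ∧ 0 < rest.length + 1 ∧ c = '#' ∧ m < cs.length by
              exact ⟨le_refl m, by omega, h2.1, h2.2⟩)]
        ring
      · rw [if_neg (by tauto), if_neg (by rintro ⟨_, _, hcc, hmm⟩; exact h2 ⟨hcc, hmm⟩)]
        ring
    · rw [if_neg (by tauto)]
      by_cases h2 : s + 1 ≤ m ∧ m - (s+1) < rest.length ∧ rest.getD (m - (s+1)) ' ' = '#' ∧ m < cs.length
      · rw [if_pos h2]
        have hms : m - s = (m - (s+1)) + 1 := by omega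
        rw [if_pos (by rw [hms, List.getD_cons_succ]; exact ⟨by omega, by omega, h2.2.2⟩)]
        ring
      · rw [if_neg h2]
        have hms : s ≤ m → m - s = (m - (s+1)) + 1 := by omega
        rw [if_neg (by rintro ⟨ha, hb, hcc, hd⟩; rw [hms ha, List.getD_cons_succ] at hcc; exact h2 ⟨by omega, by omega, hcc, hd⟩)]
        ring

theorem col_fold_init (m : Nat) (l : List (String × Nat)) (a : Int) :
    l.foldl (fun acc p => if m < p.1.toList.length ∧ p.1.toList.getD m ' ' = '#' then acc + (2:Int) ^ p.2 else acc) a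
      = a + l.foldl (fun acc p => if m < p.1.toList.length ∧ p.1.toList.getD m ' ' = '#' then acc + (2:Int) ^ p.2 else acc) 0 := by
  induction l generalizing a with
  | nil => simp
  | cons x xs ih =>
    simp only [List.foldl_cons]
    rw [ih (if m < x.1.toList.length ∧ x.1.toList.getD m ' ' = '#' then a + 2 ^ x.2 else a),
        ih (if m < x.1.toList.length ∧ x.1.toList.getD m ' ' = '#' then 0 + 2 ^ x.2 else 0)]
    split_ifs <;> ring

theorem length_colsFold :
    ∀ (pattern : List String) (s : Nat) (cs : List Int),
      ((pattern.zipIdx s).foldl (fun cs p => (p.1.toList.zipIdx).foldl (stepCol p.2) cs) cs).length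
        = cs.length := by
  intro pattern
  induction pattern with
  | nil => intro s cs; simp [List.zipIdx]
  | cons r rest ih =>
    intro s cs
    rw [List.zipIdx_cons, List.foldl_cons, ih, length_stepCol_fold]

theorem colsA_getD (m : Nat) :
    ∀ (pattern : List String) (s : Nat) (cs : List Int), m < cs.length →
      ((pattern.zipIdx s).foldl (fun cs p => (p.1.toList.zipIdx).foldl (stepCol p.2) cs) cs).getD m 0
        = cs.getD m 0 +
          (pattern.zipIdx s).foldl
            (fun acc p => if m < p.1.toList.length ∧ p.1.toList.getD m ' ' = '#' then acc + (2:Int) ^ p.2 else acc) 0 := by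
  intro pattern
  induction pattern with
  | nil => intro s cs _; simp [List.zipIdx]
  | cons r rest ih =>
    intro s cs hm
    rw [List.zipIdx_cons, List.foldl_cons, List.foldl_cons,
        ih (s+1) _ (by rw [length_stepCol_fold]; exact hm)]
    rw [col_fold_init m (rest.zipIdx (s+1))
          (if m < (r, s).1.toList.length ∧ (r, s).1.toList.getD m ' ' = '#' then 0 + (2:Int) ^ (r, s).2 else 0)]
    have := inner_cols_getD s m r.toList 0 cs
    simp only [Nat.sub_zero, Nat.zero_le, true_and] at this
    rw [this]
    simp only
    by_cases hc : m < r.toList.length ∧ r.toList.getD m ' ' = '#'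
    · rw [if_pos ⟨hc.1, hc.2, hm⟩, if_pos hc]
      ring
    · rw [if_neg (by tauto), if_neg hc]
      ring




theorem foldl_prod {σ τ α : Type} (f : σ → α → σ) (g : τ → α → τ) :
    ∀ (l : List α) (a : σ) (b : τ),
      l.foldl (fun st x => (f st.1 x, g st.2 x)) (a, b) = (l.foldl f a, l.foldl g b) := by
  intro l
  induction l with
  | nil => intro a b; rfl
  | cons x xs ih => intro a b; simp only [List.foldl_cons]; exact ih _ _

theorem get_sums_eq_pair (pattern : List String) :
    get_sums pattern =
      (pattern.zipIdx.foldl (fun rs p => (p.1.toList.zipIdx).foldl (stepRow p.2) rs)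
         (List.replicate pattern.length 0),
       pattern.zipIdx.foldl (fun cs p => (p.1.toList.zipIdx).foldl (stepCol p.2) cs)
         (List.replicate (pattern.headD "").toList.length 0)) := by
  unfold get_sums
  simp only
  have hstep : (fun (st : List Int × List Int) (p : String × Nat) =>
      p.1.toList.zipIdx.foldl
        (fun st2 q =>
          if q.1 = '#' then
            (bump st2.1 p.2 ((2:Int) ^ q.2), bump st2.2 q.2 ((2:Int) ^ p.2))
          else st2)
        st)
      = (fun st p => ((p.1.toList.zipIdx).foldl (stepRow p.2) st.1,
                      (p.1.toList.zipIdx).foldl (stepCol p.2) st.2)) := by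
    funext st p
    have h2 : (fun (st2 : List Int × List Int) (q : Char × Nat) =>
        if q.1 = '#' then
          (bump st2.1 p.2 ((2:Int) ^ q.2), bump st2.2 q.2 ((2:Int) ^ p.2))
        else st2)
        = (fun st2 q => (stepRow p.2 st2.1 q, stepCol p.2 st2.2 q)) := by
      funext st2 q
      unfold stepRow stepCol
      split_ifs <;> rfl
    rw [h2]
    exact foldl_prod _ _ _ _ _
  rw [hstep]
  exact foldl_prod (fun rs (p : String × Nat) => (p.1.toList.zipIdx).foldl (stepRow p.2) rs)
    (fun cs (p : String × Nat) => (p.1.toList.zipIdx).foldl (stepCol p.2) cs) pattern.zipIdx _ _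

theorem ports_eq (pattern : List String) : get_sums pattern = get_sums_alt pattern := by
  rw [get_sums_eq_pair]
  unfold get_sums_alt
  refine Prod.ext ?_ ?_
  · simp only
    apply List.ext_getElem
    · rw [length_rowsFold]; simp
    · intro i h1 h2
      rw [← List.getD_eq_getElem _ 0 h1, ← List.getD_eq_getElem _ 0 h2]
      have hlen : i < pattern.length := by
        have := length_rowsFold pattern 0 (List.replicate pattern.length 0)
        simp at this
        omega
      rw [rowsA_getD]
      simp only [List.length_replicate, Nat.sub_zero, Nat.zero_le, true_and]
      rw [if_pos ⟨hlen, hlen⟩]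
      have h0 : (List.replicate pattern.length (0:Int)).getD i 0 = 0 := by
        rw [List.getD_eq_getElem _ 0 (by simpa using hlen)]; simp
      have hmap : (pattern.map (fun r => rowMask r.toList)).getD i 0
          = rowMask ((pattern.getD i "").toList) := by
        rw [List.getD_eq_getElem _ 0 (by simpa using hlen), List.getElem_map,
            List.getD_eq_getElem _ _ hlen]
      rw [h0, hmap]
      ring
  · simp only
    apply List.ext_getElem
    · rw [length_colsFold]; simp
    · intro j h1 h2
      rw [← List.getD_eq_getElem _ 0 h1, ← List.getD_eq_getElem _ 0 h2]
      have hw : j < (pattern.headD "").toList.length := by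
        have := length_colsFold pattern 0 (List.replicate (pattern.headD "").toList.length 0)
        rw [this] at h1
        simpa using h1
      rw [colsA_getD j pattern 0 _ (by simpa using hw)]
      have h0 : (List.replicate (pattern.headD "").toList.length (0:Int)).getD j 0 = 0 := by
        rw [List.getD_eq_getElem _ 0 (by simpa using hw)]; simp
      rw [h0]
      have hr : ((List.range (pattern.headD "").toList.length).map (colMask pattern)).getD j 0
          = colMask pattern j := by
        rw [List.getD_eq_getElem _ 0 (by simpa using hw), List.getElem_map, List.getElem_range]
      rw [hr]
      unfold colMask
      ring

-- ===== VERDICT (by name: the statement is the Claim_ definition above) =====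
theorem get_sums_spec : Claim_equal_get_sums := by
  intro pattern _ _
  unfold Spec_get_sums
  exact ports_eq pattern
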